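-- pv_equiv track=rewrite | github.com/qodhrkawk/Algorithm_Practice | 2021/2/7/9.py | solution
-- ===== SOURCE A (Python) =====
-- def solution(s):
--     answer = ''
--     tmp = ''
--     for i in range(len(s)):
--         if s[i] == ' ' :
--             tmp = tmp.capitalize()
--             answer += tmp + ' '
--             tmp = ''
--         else :
--             tmp += s[i]
--
--     tmp = tmp.capitalize()
--     answer += tmp
--     return answer
-- ===== SOURCE B (Python) =====
-- def solution(s):
--     return ' '.join(w.capitalize() for w in s.split(' '))
-- ===== Notes on version B (the rewrite author's own statement) =====
-- stated objective: idiomatic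
-- what changed: Replaced the explicit character-by-character scan with manual word-buffer state and repeated string concatenation by a pipeline that splits on single spaces, capitalizes each piece, and rejoins with single spaces.
import Mathlib
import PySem

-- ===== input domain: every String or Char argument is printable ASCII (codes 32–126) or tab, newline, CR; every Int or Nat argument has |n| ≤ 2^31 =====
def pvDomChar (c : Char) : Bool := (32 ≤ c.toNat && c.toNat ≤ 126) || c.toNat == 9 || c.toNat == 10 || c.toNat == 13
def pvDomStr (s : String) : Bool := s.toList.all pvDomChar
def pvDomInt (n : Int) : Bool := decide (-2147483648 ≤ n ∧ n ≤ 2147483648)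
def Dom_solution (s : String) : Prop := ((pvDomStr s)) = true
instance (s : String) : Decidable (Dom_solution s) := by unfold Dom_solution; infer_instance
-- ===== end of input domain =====

-- B replaces A's character-by-character scan with manual word-boundary state by a
-- split(' ') / map capitalize / join(' ') pipeline (objective: idiomatic).

-- str.capitalize() on the ASCII domain: first char uppercased, the rest lowercased
def pyCapitalize (cs : List Char) : List Char :=
  match cs with
  | [] => []
  | c :: rest => PySem.Chars.upperChar c :: PySem.Chars.lower rest

-- ===== PORT A =====
-- the for-loop over s's characters with accumulators (answer, tmp)
def solutionGo : List Char → List Char → List Char → List Char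
  | [], answer, tmp => answer ++ pyCapitalize tmp
  | c :: rest, answer, tmp =>
      if c = ' ' then solutionGo rest (answer ++ pyCapitalize tmp ++ [' ']) []
      else solutionGo rest answer (tmp ++ [c])

def solution (s : String) : String := String.mk (solutionGo s.toList [] [])

-- ===== PORT B =====
def solution_alt (s : String) : String :=
  String.mk (PySem.Chars.join [' ']
    ((PySem.Chars.splitOn s.toList [' ']).map pyCapitalize))

-- ===== PRECONDITION & SPEC =====
def Spec_solution (s : String) (out : String) : Prop := out = solution_alt s
instance (s : String) (out : String) : Decidable (Spec_solution s out) := by unfold Spec_solution; infer_instance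

-- ===== CLAIM (what is proved, stated in full; the proofs are below) =====
def Claim_equal_solution : Prop := ∀ (s : String), Dom_solution s → Spec_solution s (solution s)

-- ===== LEMMAS AND PROOFS =====

-- reference splitter on ' '
def splitSp : List Char → List (List Char)
  | [] => [[]]
  | c :: rest => if c = ' ' then [] :: splitSp rest else (splitSp rest).modifyHead (c :: ·)

theorem splitSp_ne_nil (l : List Char) : splitSp l ≠ [] := by
  cases l with
  | nil => simp [splitSp]
  | cons c rest =>
      simp only [splitSp]
      split_ifs
      · simp
      · cases h : splitSp rest with
        | nil => exact absurd h (splitSp_ne_nil rest)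
        | cons a t => simp

theorem go_step_sp (f : Nat) (rest cur : List Char) (acc : List (List Char)) :
    PySem.Chars.splitOn.go [' '] (f+1) (' ' :: rest) cur acc
      = PySem.Chars.splitOn.go [' '] f rest [] (cur.reverse :: acc) := by
  rw [PySem.Chars.splitOn.go]
  simp [List.isPrefixOf]

theorem go_step_ch (f : Nat) (c : Char) (rest cur : List Char) (acc : List (List Char))
    (h : c ≠ ' ') :
    PySem.Chars.splitOn.go [' '] (f+1) (c :: rest) cur acc
      = PySem.Chars.splitOn.go [' '] f rest (c :: cur) acc := by
  rw [PySem.Chars.splitOn.go]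
  simp [List.isPrefixOf, Ne.symm h]

theorem splitOn_go_space (l : List Char) : ∀ (fuel : Nat) (cur : List Char)
    (acc : List (List Char)), l.length < fuel →
    PySem.Chars.splitOn.go [' '] fuel l cur acc
      = acc.reverse ++ (splitSp l).modifyHead (cur.reverse ++ ·) := by
  induction l with
  | nil =>
      intro fuel cur acc h
      cases fuel with
      | zero => omega
      | succ f => simp [PySem.Chars.splitOn.go, splitSp]
  | cons c rest ih =>
      intro fuel cur acc h
      cases fuel with
      | zero => simp at h
      | succ f =>
          by_cases hc : c = ' '
          · subst hc
            rw [go_step_sp, ih f [] (cur.reverse :: acc) (by simpa using h)]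
            cases hs : splitSp rest with
            | nil => exact absurd hs (splitSp_ne_nil rest)
            | cons a t => simp [splitSp, hs]
          · rw [go_step_ch f c rest cur acc hc,
                ih f (c :: cur) acc (by simpa using h)]
            simp only [splitSp, if_neg hc]
            cases hs : splitSp rest with
            | nil => exact absurd hs (splitSp_ne_nil rest)
            | cons a t => simp

theorem splitOn_space (l : List Char) :
    PySem.Chars.splitOn l [' '] = splitSp l := by
  unfold PySem.Chars.splitOn
  rw [splitOn_go_space l (l.length + 1) [] [] (by omega)]
  cases hs : splitSp l with
  | nil => exact absurd hs (splitSp_ne_nil l)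
  | cons a t => simp

theorem join_space_ne_nil (x : List Char) (xs : List (List Char)) (h : xs ≠ []) :
    PySem.Chars.join [' '] (x :: xs) = x ++ ' ' :: PySem.Chars.join [' '] xs := by
  cases xs with
  | nil => exact absurd rfl h
  | cons y ys => simp [PySem.Chars.join, List.intercalate, List.intersperse]

theorem solutionGo_eq (cs : List Char) : ∀ (answer tmp : List Char),
    solutionGo cs answer tmp
      = answer ++ PySem.Chars.join [' ']
          (((splitSp cs).modifyHead (tmp ++ ·)).map pyCapitalize) := by
  induction cs with
  | nil =>
      intro answer tmp
      simp [solutionGo, splitSp, PySem.Chars.join, List.intercalate]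
  | cons c rest ih =>
      intro answer tmp
      by_cases hc : c = ' '
      · subst hc
        have e1 : solutionGo (' ' :: rest) answer tmp
            = solutionGo rest (answer ++ pyCapitalize tmp ++ [' ']) [] := by
          simp [solutionGo]
        have e2 : splitSp (' ' :: rest) = [] :: splitSp rest := by simp [splitSp]
        rw [e1, ih, e2]
        cases hs : splitSp rest with
        | nil => exact absurd hs (splitSp_ne_nil rest)
        | cons a t =>
            simp only [List.modifyHead, List.nil_append, List.map_cons]
            simp only [List.append_nil]
            rw [join_space_ne_nil (pyCapitalize tmp)
                  (pyCapitalize a :: List.map pyCapitalize t) (by simp)]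
            simp
      · simp only [solutionGo, if_neg hc]
        rw [ih]
        simp only [splitSp, if_neg hc]
        cases hs : splitSp rest with
        | nil => exact absurd hs (splitSp_ne_nil rest)
        | cons a t => simp

-- ===== VERDICT (by name: the statement is the Claim_ definition above) =====
theorem solution_spec : Claim_equal_solution := by
  intro s _
  unfold Spec_solution solution solution_alt
  rw [solutionGo_eq, splitOn_space]
  cases hs : splitSp s.toList with
  | nil => exact absurd hs (splitSp_ne_nil s.toList)
  | cons a t => simp
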